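-- pv_equiv track=rewrite | github.com/FunkyGhetto/epstein-efta-analysis | tools/final_verify.py | find_pdf_for_efta
-- ===== SOURCE A (Python) =====
-- def find_pdf_for_efta(efta_num, index):
--     """Find which PDF contains a given EFTA number and what page."""
--     bases = sorted(index.keys())
--     for i, base in enumerate(bases):
--         next_base = bases[i+1] if i+1 < len(bases) else base + 9999
--         if base <= efta_num < next_base:
--             page = efta_num - base + 1
--             return index[base], base, page
--     return None, None, None
-- ===== SOURCE B (Python) =====
-- def find_pdf_for_efta(efta_num, index):
--     """Find which PDF contains a given EFTA number and what page (single max-scan, no sorting)."""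
--     best = None
--     any_greater = False
--     for base in index.keys():
--         if base <= efta_num:
--             if best is None or base > best:
--                 best = base
--         else:
--             any_greater = True
--     if best is None:
--         return None, None, None
--     if not any_greater and efta_num >= best + 9999:
--         return None, None, None
--     return index[best], best, efta_num - best + 1
-- ===== Notes on version B (the rewrite author's own statement) =====
-- stated objective: faster
-- what changed: Replaces sort-then-linear-interval-scan with a single unsorted pass that tracks the maximum key <= efta_num and whether any key exceeds it, then applies the last-interval +9999 cap only when no larger key exists.
import Mathlib
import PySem

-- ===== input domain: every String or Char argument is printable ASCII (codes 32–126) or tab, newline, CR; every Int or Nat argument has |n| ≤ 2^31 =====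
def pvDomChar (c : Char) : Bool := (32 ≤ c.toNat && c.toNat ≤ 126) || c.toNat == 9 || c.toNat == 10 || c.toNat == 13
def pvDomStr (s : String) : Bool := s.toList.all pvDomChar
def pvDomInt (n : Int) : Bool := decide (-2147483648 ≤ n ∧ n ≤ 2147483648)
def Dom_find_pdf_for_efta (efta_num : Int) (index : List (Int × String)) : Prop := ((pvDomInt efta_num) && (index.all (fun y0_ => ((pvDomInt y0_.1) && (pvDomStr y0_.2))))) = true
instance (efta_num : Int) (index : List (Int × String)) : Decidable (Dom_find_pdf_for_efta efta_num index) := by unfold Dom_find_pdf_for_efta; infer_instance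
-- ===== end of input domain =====

-- B replaces A's sort-then-interval-scan with a single unsorted max-tracking pass over the keys.


-- ===== PORT A =====
-- the 'for i, base in enumerate(bases)' loop: the head of the remaining list is bases[i];
-- bases[i+1] is the tail's head (if any), else next_base = base + 9999
def pvALoop (efta : Int) (d : PySem.Dict Int String) : List Int → Option String × Option Int × Option Int
  | [] => (none, none, none)
  | b :: rest =>
    let next : Int := match rest with | [] => b + 9999 | b' :: _ => b'
    if b ≤ efta ∧ efta < next then (d.get? b, some b, some (efta - b + 1))
    else pvALoop efta d rest

def find_pdf_for_efta (efta_num : Int) (index : List (Int × String)) : Option String × Option Int × Option Int :=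
  pvALoop efta_num (PySem.Dict.ofList index)
    (PySem.List.sorted (PySem.Dict.ofList index).keys (fun x => x) false)

-- ===== PORT B =====
-- one body of Source B's loop: state = (best, any_greater)
def pvBStep (efta : Int) (s : Option Int × Bool) (b : Int) : Option Int × Bool :=
  if b ≤ efta then
    match s.1 with
    | none => (some b, s.2)
    | some m => if m < b then (some b, s.2) else s
  else (s.1, true)

-- Source B's code after the loop
def pvBFinish (efta : Int) (d : PySem.Dict Int String) (s : Option Int × Bool) :
    Option String × Option Int × Option Int :=
  match s.1 with
  | none => (none, none, none)
  | some m =>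
    if s.2 = false ∧ m + 9999 ≤ efta then (none, none, none)
    else (d.get? m, some m, some (efta - m + 1))

def find_pdf_for_efta_alt (efta_num : Int) (index : List (Int × String)) : Option String × Option Int × Option Int :=
  pvBFinish efta_num (PySem.Dict.ofList index)
    ((PySem.Dict.ofList index).keys.foldl (pvBStep efta_num) (none, false))

-- ===== PRECONDITION & SPEC =====
def Spec_find_pdf_for_efta (efta_num : Int) (index : List (Int × String)) (out : Option String × Option Int × Option Int) : Prop := out = find_pdf_for_efta_alt efta_num index
instance (efta_num : Int) (index : List (Int × String)) (out : Option String × Option Int × Option Int) : Decidable (Spec_find_pdf_for_efta efta_num index out) := by unfold Spec_find_pdf_for_efta; infer_instance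

-- ===== CLAIM (what is proved, stated in full; the proofs are below) =====
def Claim_equal_find_pdf_for_efta : Prop := ∀ (efta_num : Int) (index : List (Int × String)), Dom_find_pdf_for_efta efta_num index → Spec_find_pdf_for_efta efta_num index (find_pdf_for_efta efta_num index)

-- ===== LEMMAS AND PROOFS =====

-- max of two optional ints
def pvOmax : Option Int → Option Int → Option Int
  | none, b => b
  | some x, none => some x
  | some x, some y => some (max x y)

-- maximum element of l that is ≤ efta (none if there is no such element)
def pvMaxLe (efta : Int) : List Int → Option Int
  | [] => none
  | b :: l => if b ≤ efta then pvOmax (some b) (pvMaxLe efta l) else pvMaxLe efta l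

theorem pvMaxLe_cons (efta b : Int) (l : List Int) :
    pvMaxLe efta (b :: l) = if b ≤ efta then pvOmax (some b) (pvMaxLe efta l) else pvMaxLe efta l := rfl

theorem pvALoop_single (efta : Int) (d : PySem.Dict Int String) (b : Int) :
    pvALoop efta d [b] =
      if b ≤ efta ∧ efta < b + 9999 then (d.get? b, some b, some (efta - b + 1))
      else (none, none, none) := rfl

theorem pvALoop_cons2 (efta : Int) (d : PySem.Dict Int String) (b b' : Int) (t : List Int) :
    pvALoop efta d (b :: b' :: t) =
      if b ≤ efta ∧ efta < b' then (d.get? b, some b, some (efta - b + 1))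
      else pvALoop efta d (b' :: t) := rfl

theorem pvOmax_assoc (a b c : Option Int) : pvOmax (pvOmax a b) c = pvOmax a (pvOmax b c) := by
  cases a <;> cases b <;> cases c <;> simp [pvOmax, max_assoc]

theorem pvBStep_fst (efta : Int) (s : Option Int × Bool) (b : Int) :
    (pvBStep efta s b).1 = pvOmax s.1 (if b ≤ efta then some b else none) := by
  unfold pvBStep
  split_ifs with h
  · cases hm : s.1 with
    | none => simp [pvOmax]
    | some m =>
      rw [show (match (some m : Option Int) with
            | none => ((some b : Option Int), s.2)
            | some m => if m < b then (some b, s.2) else s)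
          = if m < b then (some b, s.2) else s from rfl]
      split_ifs with h2
      · simp [pvOmax, max_eq_right (le_of_lt h2)]
      · simp [pvOmax, max_eq_left (by omega : b ≤ m), hm]
  · cases s.1 <;> simp [pvOmax]

theorem pvBStep_snd (efta : Int) (s : Option Int × Bool) (b : Int) :
    (pvBStep efta s b).2 = (s.2 || decide (efta < b)) := by
  unfold pvBStep
  split_ifs with h
  · cases hm : s.1 with
    | none => simp; omega
    | some m =>
      rw [show (match (some m : Option Int) with
            | none => ((some b : Option Int), s.2)
            | some m => if m < b then (some b, s.2) else s)
          = if m < b then (some b, s.2) else s from rfl]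
      split_ifs <;> simp <;> omega
  · simp; omega

-- the whole fold computes (max-of-≤-keys combined with the seed, any-key-greater)
theorem pvFold_char (efta : Int) (l : List Int) (s : Option Int × Bool) :
    l.foldl (pvBStep efta) s = (pvOmax s.1 (pvMaxLe efta l), s.2 || l.any (fun b => decide (efta < b))) := by
  induction l generalizing s with
  | nil => cases s with | mk a b => cases a <;> simp [pvOmax, pvMaxLe]
  | cons b l ih =>
    simp only [List.foldl_cons, ih, pvBStep_fst, pvBStep_snd, pvOmax_assoc, List.any_cons,
      Prod.mk.injEq]
    refine ⟨?_, ?_⟩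
    · rw [pvMaxLe_cons]
      split_ifs with h
      · rfl
      · simp [pvOmax]
    · simp [Bool.or_assoc]

theorem pvMaxLe_none_iff (efta : Int) (l : List Int) :
    pvMaxLe efta l = none ↔ ∀ k ∈ l, efta < k := by
  induction l with
  | nil => simp [pvMaxLe]
  | cons b l ih =>
    rw [pvMaxLe_cons]
    split_ifs with h
    · have hs : ∀ o, pvOmax (some b) o ≠ none := by intro o; cases o <;> simp [pvOmax]
      constructor
      · intro he; exact absurd he (hs _)
      · intro hf; have := hf b (by simp); omega
    · rw [ih]
      constructor
      · intro h' k hk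
        rw [List.mem_cons] at hk
        rcases hk with rfl | hk
        · omega
        · exact h' k hk
      · intro h' k hk; exact h' k (by simp [hk])

theorem pvMaxLe_some (efta : Int) (l : List Int) (m : Int) (h : pvMaxLe efta l = some m) :
    m ∈ l ∧ m ≤ efta ∧ ∀ k ∈ l, k ≤ efta → k ≤ m := by
  induction l generalizing m with
  | nil => simp [pvMaxLe] at h
  | cons b l ih =>
    rw [pvMaxLe_cons] at h
    split_ifs at h with hb
    · cases hr : pvMaxLe efta l with
      | none =>
        rw [hr] at h; simp [pvOmax] at h
        have hall := (pvMaxLe_none_iff efta l).1 hr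
        subst h
        refine ⟨by simp, hb, ?_⟩
        intro k hk hke
        rw [List.mem_cons] at hk
        rcases hk with rfl | hk
        · omega
        · have := hall k hk; omega
      | some m' =>
        rw [hr] at h; simp [pvOmax] at h
        obtain ⟨hm', hm'le, hmax⟩ := ih m' hr
        refine ⟨?_, by omega, ?_⟩
        · rcases max_choice b m' with hc | hc <;> rw [← h, hc] <;> simp [hm']
        · intro k hk hke
          rw [List.mem_cons] at hk
          rcases hk with rfl | hk
          · omega
          · have := hmax k hk hke; omega
    · obtain ⟨hm, hle, hmax⟩ := ih m h
      refine ⟨by simp [hm], hle, ?_⟩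
      intro k hk hke
      rw [List.mem_cons] at hk
      rcases hk with rfl | hk
      · omega
      · exact hmax k hk hke

-- pvMaxLe is invariant under permutation
theorem pvMaxLe_perm (efta : Int) {l₁ l₂ : List Int} (hp : l₁.Perm l₂) :
    pvMaxLe efta l₁ = pvMaxLe efta l₂ := by
  cases h1 : pvMaxLe efta l₁ with
  | none =>
    cases h2 : pvMaxLe efta l₂ with
    | none => rfl
    | some m =>
      obtain ⟨hm, hle, _⟩ := pvMaxLe_some efta l₂ m h2
      have := (pvMaxLe_none_iff efta l₁).1 h1 m (hp.mem_iff.2 hm)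
      omega
  | some m =>
    cases h2 : pvMaxLe efta l₂ with
    | none =>
      obtain ⟨hm, hle, _⟩ := pvMaxLe_some efta l₁ m h1
      have := (pvMaxLe_none_iff efta l₂).1 h2 m (hp.mem_iff.1 hm)
      omega
    | some m' =>
      obtain ⟨hm, hle, hmax⟩ := pvMaxLe_some efta l₁ m h1
      obtain ⟨hm', hle', hmax'⟩ := pvMaxLe_some efta l₂ m' h2
      have h12 := hmax' m (hp.mem_iff.1 hm) hle
      have h21 := hmax m' (hp.mem_iff.2 hm') hle'
      rw [le_antisymm h12 h21]

-- A's scan over a ≤-sorted list equals B's post-loop decision on (max-of-≤, any-greater)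
theorem pvALoop_sorted (efta : Int) (d : PySem.Dict Int String) (l : List Int)
    (hs : l.Pairwise (· ≤ ·)) :
    pvALoop efta d l = pvBFinish efta d (pvMaxLe efta l, l.any (fun b => decide (efta < b))) := by
  induction l with
  | nil => rfl
  | cons b l ih =>
    have hble : ∀ k ∈ l, b ≤ k := fun k hk => (List.pairwise_cons.1 hs).1 k hk
    have htl : l.Pairwise (· ≤ ·) := (List.pairwise_cons.1 hs).2
    cases l with
    | nil =>
      rw [pvALoop_single]
      by_cases hb : b ≤ efta
      · have h1 : pvMaxLe efta [b] = some b := by simp [pvMaxLe, hb]; rfl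
        have h2 : ([b].any fun k => decide (efta < k)) = false := by simp; omega
        rw [h1, h2]
        unfold pvBFinish
        split_ifs with hx
        · simp_all
        · simp_all
      · have h1 : pvMaxLe efta [b] = none := by simp [pvMaxLe, hb]
        rw [h1]
        split_ifs with ha
        · exact absurd ha.1 hb
        · rfl
    | cons b' t =>
      have hbb' : b ≤ b' := hble b' (by simp)
      rw [pvALoop_cons2]
      split_ifs with h
      · obtain ⟨h1, h2⟩ := h
        have hall : ∀ k ∈ b' :: t, efta < k := by
          intro k hk
          rw [List.mem_cons] at hk
          rcases hk with rfl | hk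
          · omega
          · have := (List.pairwise_cons.1 htl).1 k hk; omega
        have hnone : pvMaxLe efta (b' :: t) = none := (pvMaxLe_none_iff efta _).2 hall
        have hm : pvMaxLe efta (b :: b' :: t) = some b := by
          rw [pvMaxLe_cons, if_pos h1, hnone]; rfl
        have hany : ((b :: b' :: t).any fun k => decide (efta < k)) = true := by
          simp only [List.any_cons, Bool.or_eq_true]
          right; left; simp; omega
        rw [hm, hany]
        simp [pvBFinish]
      · rw [ih htl]
        by_cases hb : b ≤ efta
        · have hb' : b' ≤ efta := by by_contra hc; exact h ⟨hb, by omega⟩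
          obtain ⟨m, hm⟩ : ∃ m, pvMaxLe efta (b' :: t) = some m := by
            cases hmx : pvMaxLe efta (b' :: t) with
            | none => exact absurd ((pvMaxLe_none_iff efta _).1 hmx b' (by simp)) (by omega)
            | some m => exact ⟨m, rfl⟩
          obtain ⟨_, _, hmax⟩ := pvMaxLe_some efta _ m hm
          have hbm : b ≤ m := le_trans hbb' (hmax b' (by simp) hb')
          have hMl : pvMaxLe efta (b :: b' :: t) = some m := by
            rw [pvMaxLe_cons, if_pos hb, hm]
            simp [pvOmax]; omega
          rw [hMl, hm]
          have hA : ((b :: b' :: t).any fun k => decide (efta < k))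
              = ((b' :: t).any fun k => decide (efta < k)) := by
            simp only [List.any_cons]
            have hd : decide (efta < b) = false := by simp; omega
            rw [hd, Bool.false_or]
          rw [hA]
        · have hall : ∀ k ∈ b :: b' :: t, efta < k := by
            intro k hk
            rw [List.mem_cons] at hk
            rcases hk with rfl | hk
            · omega
            · have := hble k hk; omega
          have h1 : pvMaxLe efta (b :: b' :: t) = none := (pvMaxLe_none_iff efta _).2 hall
          have h2 : pvMaxLe efta (b' :: t) = none :=
            (pvMaxLe_none_iff efta _).2 (fun k hk => hall k (by simp [hk]))
          rw [h1, h2]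
          rfl

-- ===== VERDICT (by name: the statement is the Claim_ definition above) =====
theorem find_pdf_for_efta_spec : Claim_equal_find_pdf_for_efta := by
  intro efta index _
  unfold Spec_find_pdf_for_efta find_pdf_for_efta find_pdf_for_efta_alt
  have hperm : (PySem.List.sorted (PySem.Dict.ofList index).keys (fun x => x) false).Perm
      (PySem.Dict.ofList index).keys := PySem.List.sorted_perm _ _ _
  rw [pvALoop_sorted efta _ _ (PySem.List.sorted_pairwise _ _),
    pvFold_char, pvMaxLe_perm efta hperm, hperm.any_eq]
  simp [pvOmax]
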